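-- pv_equiv track=rewrite | github.com/programmer-ke/coding-katas | py/generating_primes.py | _generate_prime_candidates
-- ===== SOURCE A (Python) =====
-- def _generate_prime_candidates(maxnum):
--     """Generates a sequence of number to test for primality
--
--     We skip multiples of 2 and 3"""
--     assert maxnum > 0
--
--     if maxnum == 1:
--         return
--     if maxnum >= 2:
--         yield 2
--     if maxnum >= 3:
--         yield 3
--
--     candidate = 5
--     dx = 2
--
--     while maxnum >= candidate:
--         yield candidate
--         candidate += dx
--         dx = 6 - dx
-- ===== SOURCE B (Python) =====
-- def _generate_prime_candidates(maxnum):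
--     """Generates prime candidates by filtering the whole range 2..maxnum
--     on residue mod 6 (keeping 2, 3 and the classes 1 and 5 mod 6)."""
--     assert maxnum > 0
--     for n in range(2, maxnum + 1):
--         if n == 2 or n == 3 or n % 6 == 1 or n % 6 == 5:
--             yield n
-- ===== Notes on version B (the rewrite author's own statement) =====
-- stated objective: alternative
-- what changed: Replaces A's alternating-stride candidate stream (candidate += dx; dx = 6 - dx) with a filter over the whole range 2..maxnum keeping 2, 3 and the residue classes 1 and 5 mod 6.
import Mathlib
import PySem

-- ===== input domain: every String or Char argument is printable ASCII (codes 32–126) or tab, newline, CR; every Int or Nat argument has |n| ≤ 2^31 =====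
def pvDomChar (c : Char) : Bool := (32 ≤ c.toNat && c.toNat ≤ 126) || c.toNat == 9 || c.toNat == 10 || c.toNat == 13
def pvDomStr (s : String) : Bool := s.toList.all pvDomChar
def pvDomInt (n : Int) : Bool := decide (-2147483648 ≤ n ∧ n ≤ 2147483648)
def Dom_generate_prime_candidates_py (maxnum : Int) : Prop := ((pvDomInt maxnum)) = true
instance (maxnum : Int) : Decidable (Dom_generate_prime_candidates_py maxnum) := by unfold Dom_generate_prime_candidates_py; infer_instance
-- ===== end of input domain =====

-- B replaces A's alternating-stride candidate stream by a residue filter over the whole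
-- range 2..maxnum (objective: alternative algorithm; same cost).

-- ===== PORT A =====
-- A's while loop; fuel only makes the recursion total (one fuel unit per iteration,
-- `maxnum.toNat` suffices since the candidate grows by at least 2 each step).
def loopA : Nat → Int → Int → Int → List Int
  | 0, _, _, _ => []
  | fuel + 1, maxnum, candidate, dx =>
    if maxnum ≥ candidate then
      candidate :: loopA fuel maxnum (candidate + dx) (6 - dx)
    else []

def generate_prime_candidates_py (maxnum : Int) : List Int :=
  if maxnum = 1 then []
  else
    (if maxnum ≥ 2 then [2] else []) ++
    (if maxnum ≥ 3 then [3] else []) ++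
    loopA maxnum.toNat maxnum 5 2

-- ===== PORT B =====
-- the `if` condition guarding B's yield
def keepB (n : Int) : Bool :=
  n == 2 || n == 3 || PySem.Int.mod n 6 == 1 || PySem.Int.mod n 6 == 5

def generate_prime_candidates_py_alt (maxnum : Int) : List Int :=
  (PySem.List.pyRange 2 (maxnum + 1) 1).filter keepB

-- ===== PRECONDITION & SPEC =====
-- A's `assert maxnum > 0` raises AssertionError for maxnum ≤ 0; those inputs are excluded.
def Pre_generate_prime_candidates_py (maxnum : Int) : Prop := 0 < maxnum
instance (maxnum : Int) : Decidable (Pre_generate_prime_candidates_py maxnum) := by unfold Pre_generate_prime_candidates_py; infer_instance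

def pvWitness_generate_prime_candidates_py : Int := 30

def Spec_generate_prime_candidates_py (maxnum : Int) (out : List Int) : Prop := out = generate_prime_candidates_py_alt maxnum
instance (maxnum : Int) (out : List Int) : Decidable (Spec_generate_prime_candidates_py maxnum out) := by unfold Spec_generate_prime_candidates_py; infer_instance

-- ===== CLAIM (what is proved, stated in full; the proofs are below) =====
def Claim_equal_generate_prime_candidates_py : Prop := ∀ (maxnum : Int), Dom_generate_prime_candidates_py maxnum → Pre_generate_prime_candidates_py maxnum → Spec_generate_prime_candidates_py maxnum (generate_prime_candidates_py maxnum)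

-- ===== LEMMAS AND PROOFS =====

-- dropping a rejected head of the range under the filter
theorem filter_skip (a b : Int) (h : keepB a = false) :
    (PySem.List.pyRange a b 1).filter keepB = (PySem.List.pyRange (a + 1) b 1).filter keepB := by
  by_cases hab : a < b
  · rw [PySem.List.pyRange_one_cons hab, List.filter_cons, h]
    simp
  · rw [PySem.List.pyRange_one_eq_nil (by omega), PySem.List.pyRange_one_eq_nil (by omega)]

theorem keepB_true (n : Int) (h5 : 5 ≤ n) (h : n % 6 = 1 ∨ n % 6 = 5) : keepB n = true := by
  simp only [keepB, Bool.or_eq_true, beq_iff_eq, PySem.Int.mod_eq_emod_of_pos (by norm_num : (0:Int) < 6)]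
  omega

theorem keepB_false (n : Int) (h5 : 5 ≤ n) (h : ¬ (n % 6 = 1 ∨ n % 6 = 5)) : keepB n = false := by
  simp only [keepB, Bool.or_eq_false_iff, beq_eq_false_iff_ne, ne_eq,
    PySem.Int.mod_eq_emod_of_pos (by norm_num : (0:Int) < 6)]
  omega

-- A's stream, started at any candidate a ≡ 5 (dx = 2) or ≡ 1 (dx = 4) mod 6, is the
-- residue filter of the tail range.
theorem loopA_eq_filter (maxnum : Int) :
    ∀ (fuel : Nat) (a dx : Int), 5 ≤ a →
      ((a % 6 = 5 ∧ dx = 2) ∨ (a % 6 = 1 ∧ dx = 4)) →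
      (maxnum + 1 - a).toNat ≤ fuel →
      loopA fuel maxnum a dx = (PySem.List.pyRange a (maxnum + 1) 1).filter keepB := by
  intro fuel
  induction fuel using Nat.strong_induction_on with
  | _ fuel ih =>
    intro a dx h5 hcls hfuel
    by_cases hle : a ≤ maxnum
    · match fuel with
      | 0 => exact absurd hfuel (by omega)
      | f + 1 =>
        show (if maxnum ≥ a then a :: loopA f maxnum (a + dx) (6 - dx) else []) = _
        rw [if_pos (by omega)]
        rw [PySem.List.pyRange_one_cons (by omega : a < maxnum + 1), List.filter_cons,
          keepB_true a h5 (by omega), if_pos rfl]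
        rcases hcls with ⟨hm, hdx⟩ | ⟨hm, hdx⟩
        · subst hdx
          rw [filter_skip (a + 1) _ (keepB_false _ (by omega) (by omega)),
              show a + 1 + 1 = a + 2 from by ring]
          rw [ih f (by omega) (a + 2) (6 - 2) (by omega) (Or.inr ⟨by omega, by norm_num⟩) (by omega)]
        · subst hdx
          rw [filter_skip (a + 1) _ (keepB_false _ (by omega) (by omega)),
              show a + 1 + 1 = a + 2 from by ring,
              filter_skip (a + 2) _ (keepB_false _ (by omega) (by omega)),
              show a + 2 + 1 = a + 3 from by ring,
              filter_skip (a + 3) _ (keepB_false _ (by omega) (by omega)),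
              show a + 3 + 1 = a + 4 from by ring]
          rw [ih f (by omega) (a + 4) (6 - 4) (by omega) (Or.inl ⟨by omega, by norm_num⟩) (by omega)]
    · rw [PySem.List.pyRange_one_eq_nil (by omega), List.filter_nil]
      match fuel with
      | 0 => rfl
      | f + 1 =>
        show (if maxnum ≥ a then a :: loopA f maxnum (a + dx) (6 - dx) else []) = _
        rw [if_neg (by omega)]

-- ===== VERDICT (by name: the statement is the Claim_ definition above) =====
theorem generate_prime_candidates_py_spec : Claim_equal_generate_prime_candidates_py := by
  intro maxnum _hdom hpre
  unfold Spec_generate_prime_candidates_py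
  unfold Pre_generate_prime_candidates_py at hpre
  by_cases hsmall : maxnum ≤ 4
  · interval_cases maxnum <;> decide
  · unfold generate_prime_candidates_py generate_prime_candidates_py_alt
    rw [if_neg (by omega : ¬ maxnum = 1), if_pos (by omega : maxnum ≥ 2),
        if_pos (by omega : maxnum ≥ 3)]
    rw [PySem.List.pyRange_one_cons (by omega : (2:Int) < maxnum + 1), List.filter_cons,
        show keepB 2 = true from by decide, if_pos rfl,
        show (2:Int) + 1 = 3 from by norm_num]
    rw [PySem.List.pyRange_one_cons (by omega : (3:Int) < maxnum + 1), List.filter_cons,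
        show keepB 3 = true from by decide, if_pos rfl]
    rw [show (3:Int) + 1 = 4 from by norm_num,
        filter_skip 4 _ (by decide),
        show (4:Int) + 1 = 5 from by norm_num]
    rw [loopA_eq_filter maxnum maxnum.toNat 5 2 (by omega) (Or.inl ⟨by decide, rfl⟩) (by omega)]
    rfl
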